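-- pv_equiv track=rewrite | github.com/IlyaOrlov/PythonCourse | Practice/shashalina/lec6task1.py | chargen
-- ===== SOURCE A (Python) =====
-- def chargen(counter=10):
--     while True:
--         for c in '0123456789':
--             if counter > 0:
--                 counter -= 1
--                 yield c
--
--             else:
--                 return c
-- ===== SOURCE B (Python) =====
-- def chargen(counter=10):
--     digits = '0123456789'
--     for i in range(max(counter, 0)):
--         yield digits[i % 10]
-- ===== Notes on version B (the rewrite author's own statement) =====
-- stated objective: simpler
-- what changed: Replaced the infinite while-True with a nested for over the digit string and manual counter decrement by a single flat for over range(max(counter,0)) that picks the digit by index i % 10.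
import Mathlib
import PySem

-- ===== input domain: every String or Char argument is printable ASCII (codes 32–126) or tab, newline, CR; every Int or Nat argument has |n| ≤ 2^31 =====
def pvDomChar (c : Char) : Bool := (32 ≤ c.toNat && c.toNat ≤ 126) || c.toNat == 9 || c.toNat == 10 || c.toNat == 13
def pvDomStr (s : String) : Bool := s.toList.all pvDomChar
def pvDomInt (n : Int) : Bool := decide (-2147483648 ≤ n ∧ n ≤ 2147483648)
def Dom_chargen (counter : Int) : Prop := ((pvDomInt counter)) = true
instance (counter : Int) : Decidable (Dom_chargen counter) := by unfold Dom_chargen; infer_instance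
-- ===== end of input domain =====

-- B flattens A's infinite while-True + nested for + manual decrement into one indexed
-- pass over range(max(counter,0)) picking the digit by i % 10 (objective: simpler).
-- Equivalence is about the sequence of yielded values (A's generator 'return c' value is not observed).


-- ===== PORT A =====
-- A's loop: `while True: for c in '0123456789': if counter > 0: counter -= 1; yield c else: return`.
-- fuel is only a totality guard (2*counter.toNat+12 is always enough, proved below); each unfold
-- mirrors one step of A: the [] case is the `while True` restart of the for, the cons case is one
-- for-iteration with A's branch.
def chargenGo (fuel : Nat) (counter : Int) (ds : List Char) : List String :=
  match fuel, ds with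
  | 0, _ => []
  | fuel + 1, [] => chargenGo fuel counter "0123456789".toList
  | fuel + 1, c :: rest =>
      if counter > 0 then c.toString :: chargenGo fuel (counter - 1) rest
      else []

def chargen (counter : Int) : List String :=
  chargenGo (2 * counter.toNat + 12) counter "0123456789".toList

-- ===== PORT B =====
-- B: `for i in range(max(counter, 0)): yield digits[i % 10]` (index always in range, so the
-- pyGetD default '?' is unreachable).
def chargen_alt (counter : Int) : List String :=
  (PySem.List.pyRange 0 (max counter 0) 1).map
    (fun i => (PySem.List.pyGetD "0123456789".toList (PySem.Int.mod i 10) '?').toString)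

-- ===== PRECONDITION & SPEC =====
def Spec_chargen (counter : Int) (out : List String) : Prop := out = chargen_alt counter
instance (counter : Int) (out : List String) : Decidable (Spec_chargen counter out) := by unfold Spec_chargen; infer_instance

-- ===== CLAIM (what is proved, stated in full; the proofs are below) =====
def Claim_equal_chargen : Prop := ∀ (counter : Int), Dom_chargen counter → Spec_chargen counter (chargen counter)

-- ===== LEMMAS AND PROOFS =====

theorem chargenGo_eq (fuel : Nat) : ∀ (n k : Nat), k ≤ 10 → 2 * n + k + 2 ≤ fuel →
    chargenGo fuel (n : Int) ("0123456789".toList.drop k) =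
      (List.range n).map (fun i =>
        ("0123456789".toList.getD ((k + i) % 10) '?').toString) := by
  induction fuel with
  | zero => intro n k hk hf; omega
  | succ m ih =>
    intro n k hk hf
    rcases Nat.lt_or_ge k 10 with hlt | hge
    · have hdrop : "0123456789".toList.drop k =
          "0123456789".toList[k] :: "0123456789".toList.drop (k + 1) := by
        exact List.drop_eq_getElem_cons (by simp; omega)
      rw [hdrop]
      cases n with
      | zero => simp [chargenGo]
      | succ n' =>
        have hpos : ((n' + 1 : Nat) : Int) > 0 := by positivity
        simp only [chargenGo, if_pos hpos]
        have hsub : ((n' + 1 : Nat) : Int) - 1 = (n' : Int) := by push_cast; ring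
        rw [hsub, ih n' (k + 1) (by omega) (by omega), List.range_succ_eq_map]
        simp only [List.map_cons, List.map_map]
        congr 1
        · have h0 : (k + 0) % 10 = k := by omega
          rw [h0, List.getD_eq_getElem?_getD, List.getElem?_eq_getElem (by simp; omega)]
          simp
        · apply List.map_congr_left
          intro i _
          simp only [Function.comp, Nat.succ_eq_add_one]
          congr 2
          omega
    · have hk10 : k = 10 := by omega
      subst hk10
      have hdrop : "0123456789".toList.drop 10 = [] := by decide
      rw [hdrop]
      show chargenGo m (n : Int) "0123456789".toList = _
      have := ih n 0 (by omega) (by omega)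
      simpa using this

theorem chargen_spec : Claim_equal_chargen := by
  intro counter _
  unfold Spec_chargen chargen chargen_alt
  by_cases hle : counter ≤ 0
  · have hmax : max counter 0 = 0 := by omega
    have hnp : ¬ counter > 0 := by omega
    simp [hmax, chargenGo, hnp]
  · have hpos : 0 < counter := by omega
    have hn : counter = ((counter.toNat : Nat) : Int) := by omega
    have hmax : max counter 0 = counter := by omega
    have h := chargenGo_eq (2 * counter.toNat + 12) counter.toNat 0 (by omega) (by omega)
    simp only [List.drop_zero] at h
    rw [hmax, hn]
    simp only [Int.toNat_natCast]
    rw [h]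
    rw [PySem.List.pyRange_one]
    simp only [List.map_map]
    apply List.map_congr_left
    intro i hi
    simp only [Function.comp, zero_add]
    have hm : PySem.Int.mod (↑i) 10 = ((i % 10 : Nat) : Int) := by
      exact_mod_cast PySem.Int.mod_natCast i 10
    rw [hm, PySem.List.pyGetD_natCast]
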